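-- pv_equiv track=rewrite | github.com/newfies-dialer/newfies-dialer | newfies/survey/function_def.py | export_question_result
-- ===== SOURCE A (Python) =====
-- def export_question_result(val, column_question):
--     """Modify survey result string for export
--
--     @val : contains the result of the survey question
--     @column_question : contains the list of question
--
--     This is how we build our val :
--     SELECT group_concat(CONCAT_WS("*|*", question, response, record_file)
--             SEPARATOR "-|-") '
--
--     >>> val = "test_question_1?*|*ans1-|-test_question_2?*|**|*audio_file"
--
--     >>> column_question = "test_question_2?"
--
--     >>> export_question_result(val, column_question)
--     'audio_file'
--
--     >>> val = "test_question_1?*|*ans1-|-test_question_2?*|*ans2"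
--
--     >>> export_question_result(val, column_question)
--     'ans2'
--     """
--     if not val:
--         return ''
--     val_list = val.split("-|-")
--
--     for i in val_list:
--         if not i:
--             continue
--         if i.find("*|**|*") > 0:
--             qst_audio = i.split("*|**|*")
--             try:
--                 # check audio qst
--                 if str(column_question) == str(qst_audio[0]):
--                     return str(qst_audio[1].replace(',', ' '))
--             except:
--                 pass
--         else:
--             qst_res = i.split("*|*")
--             try:
--                 # check normal qst
--                 if str(column_question) == str(qst_res[0]):
--                     return str(qst_res[1].replace(',', ' '))
--             except:
--                 pass
--     return ''
-- ===== SOURCE B (Python) =====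
-- def _record(answers, piece):
--     """Parse one '-|-' piece and record (question, answer) first-wins."""
--     if not piece:
--         return
--     sep = '*|**|*' if piece.find('*|**|*') > 0 else '*|*'
--     parts = piece.split(sep)
--     if len(parts) >= 2:
--         answers.setdefault(parts[0], parts[1].replace(',', ' '))
--
--
-- def export_question_result(val, column_question):
--     if not val:
--         return ''
--     answers = {}
--     for piece in val.split('-|-'):
--         _record(answers, piece)
--     return answers.get(str(column_question), '')
-- ===== Notes on version B (the rewrite author's own statement) =====
-- stated objective: alternative
-- what changed: Replaces A's early-return scan with duplicated parse-and-compare branches by a single pass that parses every piece into a first-wins dict (setdefault) and a final lookup.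
import Mathlib
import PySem

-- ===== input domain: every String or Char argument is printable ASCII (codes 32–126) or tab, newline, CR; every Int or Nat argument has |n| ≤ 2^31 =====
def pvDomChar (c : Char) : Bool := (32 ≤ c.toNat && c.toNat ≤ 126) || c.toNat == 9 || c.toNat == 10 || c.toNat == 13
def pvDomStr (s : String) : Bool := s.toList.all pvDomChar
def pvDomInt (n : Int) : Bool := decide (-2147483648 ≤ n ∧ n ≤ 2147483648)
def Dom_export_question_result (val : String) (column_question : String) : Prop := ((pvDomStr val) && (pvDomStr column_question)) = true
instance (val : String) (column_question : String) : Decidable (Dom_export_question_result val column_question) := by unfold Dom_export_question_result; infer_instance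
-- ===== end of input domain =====

-- B replaces A's early-return scan (two duplicated parse/compare branches) by one pass that
-- records each piece into a first-wins dict and looks the question up once at the end (alternative, same cost).

-- ===== PORT A =====
-- the for-loop over val.split("-|-"): early return on the first matching piece;
-- a piece whose answer component is missing raises IndexError, which A swallows (continue)
def pvA_loop (cq : List Char) : List (List Char) → List Char
  | [] => []
  | i :: rest =>
    if i = [] then pvA_loop cq rest
    else if PySem.Chars.find i "*|**|*".toList > 0 then
      match PySem.Chars.splitOn i "*|**|*".toList with
      | q :: ans :: _ =>
        if cq = q then PySem.Chars.replace ans [','] [' '] else pvA_loop cq rest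
      | _ => pvA_loop cq rest
    else
      match PySem.Chars.splitOn i "*|*".toList with
      | q :: ans :: _ =>
        if cq = q then PySem.Chars.replace ans [','] [' '] else pvA_loop cq rest
      | _ => pvA_loop cq rest

def export_question_result (val : String) (column_question : String) : String :=
  if val = "" then ""
  else String.ofList (pvA_loop column_question.toList
        (PySem.Chars.splitOn val.toList "-|-".toList))

-- ===== PORT B =====
-- _record: parse one piece, first-wins insert (setdefault) when the answer component exists
def pvRecord (d : PySem.Dict (List Char) (List Char)) (piece : List Char) :
    PySem.Dict (List Char) (List Char) :=
  if piece = [] then d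
  else
    let sep := if PySem.Chars.find piece "*|**|*".toList > 0
               then "*|**|*".toList else "*|*".toList
    match PySem.Chars.splitOn piece sep with
    | q :: ans :: _ => d.setdefault q (PySem.Chars.replace ans [','] [' '])
    | _ => d

def export_question_result_alt (val : String) (column_question : String) : String :=
  if val = "" then ""
  else String.ofList
    (((PySem.Chars.splitOn val.toList "-|-".toList).foldl pvRecord
        PySem.Dict.empty).getD column_question.toList [])

-- ===== PRECONDITION & SPEC =====
def Spec_export_question_result (val : String) (column_question : String) (out : String) : Prop := out = export_question_result_alt val column_question
instance (val : String) (column_question : String) (out : String) : Decidable (Spec_export_question_result val column_question out) := by unfold Spec_export_question_result; infer_instance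

-- ===== CLAIM (what is proved, stated in full; the proofs are below) =====
def Claim_equal_export_question_result : Prop := ∀ (val : String) (column_question : String), Dom_export_question_result val column_question → Spec_export_question_result val column_question (export_question_result val column_question)

-- ===== LEMMAS AND PROOFS =====

-- proof-side view of one piece: the answer it contributes for question cq, if any
def pvParse (cq i : List Char) : Option (List Char) :=
  if i = [] then none
  else
    let sep := if PySem.Chars.find i "*|**|*".toList > 0
               then "*|**|*".toList else "*|*".toList
    match PySem.Chars.splitOn i sep with
    | q :: ans :: _ =>
      if cq = q then some (PySem.Chars.replace ans [','] [' ']) else none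
    | _ => none

theorem pvA_loop_eq (cq : List Char) (l : List (List Char)) :
    pvA_loop cq l = (l.findSome? (pvParse cq)).getD [] := by
  induction l with
  | nil => rfl
  | cons i rest ih =>
    simp only [pvA_loop, List.findSome?_cons, pvParse]
    by_cases h0 : i = []
    · simp [h0, ih]
    · simp only [h0, if_false]
      by_cases hf : PySem.Chars.find i "*|**|*".toList > 0
      · simp only [hf, if_true]
        cases h : PySem.Chars.splitOn i "*|**|*".toList with
        | nil => simp [ih]
        | cons q t =>
          cases t with
          | nil => simp [ih]
          | cons ans t' =>
            by_cases hq : cq = q <;> simp [hq, ih]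
      · simp only [hf, if_false]
        cases h : PySem.Chars.splitOn i "*|*".toList with
        | nil => simp [ih]
        | cons q t =>
          cases t with
          | nil => simp [ih]
          | cons ans t' =>
            by_cases hq : cq = q <;> simp [hq, ih]

theorem pvRecord_get? (d : PySem.Dict (List Char) (List Char)) (cq i : List Char) :
    (pvRecord d i).get? cq = (d.get? cq).or (pvParse cq i) := by
  simp only [pvRecord, pvParse]
  by_cases h0 : i = []
  · simp [h0]
  · simp only [h0, if_false]
    cases h : PySem.Chars.splitOn i
        (if PySem.Chars.find i "*|**|*".toList > 0
         then "*|**|*".toList else "*|*".toList) with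
    | nil => simp
    | cons q t =>
      cases t with
      | nil => simp
      | cons ans t' =>
        simp only []
        by_cases hq : cq = q
        · subst hq
          rw [PySem.Dict.get?_setdefault_self]
          cases d.get? cq <;> simp
        · rw [PySem.Dict.get?_setdefault_of_ne _ _ hq]
          simp [hq]

theorem pvFoldl_get? (cq : List Char) (l : List (List Char))
    (d : PySem.Dict (List Char) (List Char)) :
    (l.foldl pvRecord d).get? cq = (d.get? cq).or (l.findSome? (pvParse cq)) := by
  induction l generalizing d with
  | nil => simp
  | cons i rest ih =>
    simp only [List.foldl_cons, List.findSome?_cons, ih, pvRecord_get?]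
    cases hp : pvParse cq i
    · simp
    · cases d.get? cq <;> simp

-- ===== VERDICT (by name: the statement is the Claim_ definition above) =====
theorem export_question_result_spec : Claim_equal_export_question_result := by
  intro val cq _
  unfold Spec_export_question_result export_question_result export_question_result_alt
  by_cases hv : val = ""
  · simp [hv]
  · simp only [hv, if_false]
    rw [PySem.Dict.getD_eq_get?_getD, pvFoldl_get?, PySem.Dict.get?_empty,
      Option.none_or, pvA_loop_eq]
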